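-- pv_equiv track=rewrite | github.com/leemhyungyu/Baekjoon-Programmers | Baekjoon/BFS/Baekjoon1976.py | solution
-- ===== SOURCE A (Python) =====
-- from collections import defaultdict
-- from collections import deque
--
-- def solution(array, n, m, plan):
--     routes = defaultdict(list)
--     visited = [False for _ in range(n)]
--     for i in range(n):
--         for j in range(n):
--             if array[i][j] == 1:
--                 routes[i] += [j]
--
--     def bfs(start):
--         q = deque([start])
--         visited[start] = True
--         while q:
--             now = q.popleft()
--
--             for i in routes[now]:
--                 if not visited[i]:
--                     q.append(i)
--                     visited[i] = True
--
--     bfs(plan[0] - 1)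
--
--     for i in plan:
--         if not visited[i - 1]:
--             return "NO"
--
--     return "YES"
-- ===== SOURCE B (Python) =====
-- def solution(array, n, m, plan):
--     # Lazy DFS: no adjacency table is built up front; a vertex's row is scanned
--     # only the first time the DFS visits it (vertices outside 0..n-1 have no edges).
--     visited = [False] * n
--
--     def neighbors(u):
--         if 0 <= u < n:
--             return [j for j in range(n) if array[u][j] == 1]
--         return []
--
--     stack = [plan[0] - 1]
--     while stack:
--         u = stack.pop()
--         if not visited[u]:
--             visited[u] = True
--             for w in neighbors(u):
--                 stack.append(w)
--
--     return "YES" if all(visited[p - 1] for p in plan) else "NO"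
-- ===== Notes on version B (the rewrite author's own statement) =====
-- stated objective: alternative
-- what changed: Drops the upfront defaultdict adjacency build entirely: a lazy mark-on-pop stack DFS computes each vertex's neighbour row by filtering the matrix row only when the vertex is first visited, and the final membership loop becomes a single all(...) expression.
import Mathlib
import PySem

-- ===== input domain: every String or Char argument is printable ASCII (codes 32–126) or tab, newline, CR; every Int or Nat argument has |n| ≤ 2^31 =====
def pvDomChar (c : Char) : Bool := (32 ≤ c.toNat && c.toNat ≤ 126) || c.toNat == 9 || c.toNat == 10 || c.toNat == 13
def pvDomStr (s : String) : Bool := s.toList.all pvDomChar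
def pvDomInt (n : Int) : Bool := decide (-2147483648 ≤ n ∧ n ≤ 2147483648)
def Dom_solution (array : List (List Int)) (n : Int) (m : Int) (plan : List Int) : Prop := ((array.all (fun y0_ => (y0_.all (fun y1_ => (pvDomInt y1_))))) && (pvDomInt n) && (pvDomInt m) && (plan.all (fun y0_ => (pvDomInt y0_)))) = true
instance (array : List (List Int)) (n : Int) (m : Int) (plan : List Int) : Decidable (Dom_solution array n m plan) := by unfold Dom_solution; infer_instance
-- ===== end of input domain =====

-- B drops A's upfront defaultdict adjacency build: a lazy mark-on-pop stack DFS filters a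
-- vertex's matrix row only when that vertex is first visited, and the final plan check is a
-- single 'all' expression; same return value wherever A returns.

-- ===== PORT A =====
-- Python's visited[i] read / visited[i] = True with negative-index wraparound, as A performs
-- them; exact for -len(v) ≤ i < len(v) (Pre_ keeps every executed index in that range).
def pvGetB (v : List Bool) (i : Int) : Bool :=
  if 0 ≤ i then v.getD i.toNat true else v.getD (i + v.length).toNat true
def pvSetB (v : List Bool) (i : Int) : List Bool :=
  if 0 ≤ i then v.set i.toNat true else v.set (i + v.length).toNat true
-- A's final loop 'for i in plan: if not visited[i-1]: return "NO"' / 'return "YES"'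
def pvCheckPlan (v : List Bool) (plan : List Int) : String :=
  if plan.all (fun p => pvGetB v (p - 1)) then "YES" else "NO"

-- the while-q loop of bfs; fuel bounds the iteration count (each iteration pops one element and
-- every enqueue marks a fresh vertex, so length q + count false strictly decreases; fuel n+2 suffices)
def pvBfs (routes : PySem.Dict Int (List Int)) : Nat → List Bool → List Int → List Bool
  | _, v, [] => v
  | 0, v, _ => v
  | fuel + 1, v, now :: rest =>
    let s := (routes.getD now []).foldl
      (fun (s : List Bool × List Int) i => if pvGetB s.1 i then s else (pvSetB s.1 i, s.2 ++ [i]))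
      (v, rest)
    pvBfs routes fuel s.1 s.2

def solution (array : List (List Int)) (n : Int) (m : Int) (plan : List Int) : String :=
  let routes : PySem.Dict Int (List Int) :=
    (PySem.List.pyRange 0 n).foldl (fun d i =>
      (PySem.List.pyRange 0 n).foldl (fun d j =>
        if PySem.List.pyGetD (PySem.List.pyGetD array i []) j 0 == 1 then d.modify i [] (· ++ [j])
        else d) d)
      PySem.Dict.empty
  let visited := List.replicate n.toNat false
  let start := PySem.List.pyGetD plan 0 1 - 1
  let visited := pvSetB visited start
  let visited := pvBfs routes (n.toNat + 2) visited [start]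
  pvCheckPlan visited plan

-- ===== PORT B =====
-- neighbors(u): the comprehension '[j for j in range(n) if array[u][j] == 1]' for a valid
-- vertex, [] otherwise
def pvNbrs (array : List (List Int)) (n : Int) (u : Int) : List Int :=
  if 0 ≤ u ∧ u < n then
    (PySem.List.pyRange 0 n).filter
      (fun j => PySem.List.pyGetD (PySem.List.pyGetD array u []) j 0 == 1)
  else []

-- the while-stack loop; the Lean list is the Python stack reversed (append = cons, pop() = head).
-- fuel: pops ≤ 1 + pushes, pushes ≤ n per marking, markings ≤ n, so n*n+n+2 suffices.
def pvWalk (array : List (List Int)) (n : Int) : Nat → List Bool → List Int → List Bool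
  | _, v, [] => v
  | 0, v, _ => v
  | fuel + 1, v, u :: st =>
    if (PySem.List.pyGet? v u).getD true then pvWalk array n fuel v st
    else pvWalk array n fuel (PySem.List.pySetD v u true)
      ((pvNbrs array n u).foldl (fun s w => w :: s) st)

def solution_alt (array : List (List Int)) (n : Int) (m : Int) (plan : List Int) : String :=
  let visited := pvWalk array n (n.toNat * n.toNat + n.toNat + 2)
    (List.replicate n.toNat false) [PySem.List.pyGetD plan 0 1 - 1]
  if plan.all (fun p => (PySem.List.pyGet? visited (p - 1)).getD true) then "YES" else "NO"

-- ===== PRECONDITION & SPEC =====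
-- Pre_ is exactly where A returns normally: n ≥ 1 with the first n rows of array present and ≥ n
-- wide (else A raises IndexError building routes), plan nonempty (else A raises on plan[0]) and
-- every plan entry p with -n ≤ p-1 < n, i.e. 1-n ≤ p ≤ n (Python indexes visited[p-1] with
-- negative wraparound; entries outside that band raise IndexError).
def Pre_solution (array : List (List Int)) (n : Int) (m : Int) (plan : List Int) : Prop :=
  1 ≤ n ∧ n.toNat ≤ array.length ∧ (∀ row ∈ array.take n.toNat, n.toNat ≤ row.length) ∧
    plan ≠ [] ∧ ∀ p ∈ plan, 1 - n ≤ p ∧ p ≤ n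
instance (array : List (List Int)) (n : Int) (m : Int) (plan : List Int) : Decidable (Pre_solution array n m plan) := by
  unfold Pre_solution; infer_instance
def pvWitness_solution : List (List Int) × Int × Int × List Int := ([[0, 1], [1, 0]], 2, 2, [1, 2])

def Spec_solution (array : List (List Int)) (n : Int) (m : Int) (plan : List Int) (out : String) : Prop := out = solution_alt array n m plan
instance (array : List (List Int)) (n : Int) (m : Int) (plan : List Int) (out : String) : Decidable (Spec_solution array n m plan out) := by unfold Spec_solution; infer_instance

-- ===== CLAIM (what is proved, stated in full; the proofs are below) =====
def Claim_equal_solution : Prop := ∀ (array : List (List Int)) (n : Int) (m : Int) (plan : List Int), Dom_solution array n m plan → Pre_solution array n m plan → Spec_solution array n m plan (solution array n m plan)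

-- ===== LEMMAS AND PROOFS =====

-- proof-side view of the matrix: entry value, edge relation and reachability on Nat vertices
def pvVal (array : List (List Int)) (u j : Nat) : Int := (array.getD u []).getD j 0
def pvE (array : List (List Int)) (N : Nat) (u j : Nat) : Prop :=
  u < N ∧ j < N ∧ pvVal array u j = 1
def pvReach (array : List (List Int)) (N : Nat) (s k : Nat) : Prop :=
  Relation.ReflTransGen (pvE array N) s k

theorem pv_reach_subset (array : List (List Int)) (N : Nat) (s : Nat) (P : Nat → Prop)
    (hs : P s) (hcl : ∀ u j, P u → pvE array N u j → P j) :
    ∀ k, pvReach array N s k → P k := by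
  intro k h
  induction h with
  | refl => exact hs
  | tail _ he ih => exact hcl _ _ ih he

theorem pvGetB_eq (v : List Bool) (k : Nat) (h : k < v.length) :
    pvGetB v (↑k) = v.getD k false := by
  simp [pvGetB, h]

theorem pvSetB_natCast (v : List Bool) (k : Nat) : pvSetB v (↑k) = v.set k true := by
  simp [pvSetB]

theorem pv_at_set_self (v : List Bool) (u : Nat) (h : u < v.length) :
    (v.set u true).getD u false = true := by
  rw [List.getD_eq_getElem _ _ (by simpa using h)]
  simp [List.getElem_set_self]

theorem pv_at_set_ne (v : List Bool) (u k : Nat) (h : u ≠ k) :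
    (v.set u true).getD k false = v.getD k false := by
  simp [List.getD_eq_getElem?_getD, List.getElem?_set_ne h]

theorem pv_at_lt_length (v : List Bool) (k : Nat) (h : v.getD k false = true) : k < v.length := by
  by_contra hc
  rw [List.getD_eq_default _ _ (by omega)] at h
  exact absurd h (by simp)

theorem pv_at_mono_set (v : List Bool) (u k : Nat) (h : v.getD k false = true) :
    (v.set u true).getD k false = true := by
  by_cases he : u = k
  · subst he; exact pv_at_set_self v u (pv_at_lt_length v u h)
  · rw [pv_at_set_ne v u k he]; exact h

theorem pv_at_replicate (N k : Nat) : (List.replicate N false).getD k false = false := by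
  rw [List.getD_eq_getElem?_getD, List.getElem?_replicate]
  by_cases h : k < N <;> simp [h]

theorem pv_count_set (v : List Bool) (u : Nat) (hu : u < v.length) (hf : v.getD u false = false) :
    (v.set u true).count false + 1 = v.count false := by
  induction v generalizing u with
  | nil => simp at hu
  | cons b t ih =>
    cases u with
    | zero => simp_all [List.getD]
    | succ u' =>
      simp only [List.set, List.count_cons]
      have := ih u' (by simpa using hu) (by simpa [List.getD] using hf)
      omega

theorem pv_getB_false_nonneg (v : List Bool) (x : Int) (h0 : 0 ≤ x) (h : pvGetB v x = false) :
    x.toNat < v.length ∧ v.getD x.toNat false = false := by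
  simp only [pvGetB, if_pos h0] at h
  have hl : x.toNat < v.length := by
    by_contra hc
    rw [List.getD_eq_default _ _ (by omega)] at h; simp at h
  exact ⟨hl, by rw [List.getD_eq_getElem _ _ (by simpa using hl)] at h ⊢; exact h⟩

-- B's visited[u] read, for a nonnegative in-range index
theorem pv_read_nonneg (v : List Bool) (u : Int) (h0 : 0 ≤ u) (hl : u.toNat < v.length) :
    (PySem.List.pyGet? v u).getD true = v.getD u.toNat false := by
  rw [PySem.List.pyGet?_of_nonneg v h0, List.getElem?_eq_getElem hl,
    List.getD_eq_getElem _ _ hl, Option.getD_some]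

-- B's visited[u] read agrees with A's pvGetB on every in-range index (wraparound included)
theorem pv_read_eq_getB (v : List Bool) (i : Int) (hge : -(v.length : Int) ≤ i)
    (hlt : i < v.length) : (PySem.List.pyGet? v i).getD true = pvGetB v i := by
  by_cases h0 : 0 ≤ i
  · rw [pv_read_nonneg v i h0 (by omega), pvGetB, if_pos h0]
    have hl : i.toNat < v.length := by omega
    rw [List.getD_eq_getElem _ _ hl, List.getD_eq_getElem _ _ hl]
  · have hk0 : 0 < (-i).toNat := by omega
    have hkl : (-i).toNat ≤ v.length := by omega
    have hi : i = -((-i).toNat : Int) := by omega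
    rw [hi, PySem.List.pyGet?_neg_natCast v (-i).toNat hk0 hkl]
    have hidx : v.length - (-i).toNat < v.length := by omega
    rw [List.getElem?_eq_getElem hidx, Option.getD_some, pvGetB, if_neg (by omega)]
    have : (-((-i).toNat : Int) + v.length).toNat = v.length - (-i).toNat := by omega
    rw [this, List.getD_eq_getElem _ _ hidx]

-- B's visited[u] = True write, both signs
theorem pv_write_eq_setB (v : List Bool) (i : Int) (hge : -(v.length : Int) ≤ i)
    (hlt : i < v.length) : PySem.List.pySetD v i true = pvSetB v i := by
  by_cases h0 : 0 ≤ i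
  · rw [PySem.List.pySetD_of_nonneg v true h0, pvSetB, if_pos h0]
  · have hi : i = -((-i).toNat : Int) := by omega
    have h1 : PySem.List.pySetD v i true = v.set (i + v.length).toNat true := by
      simp only [PySem.List.pySetD, PySem.List.pySet?, PySem.List.pyIdx?,
        if_neg h0, if_pos hge]
      simp only [Option.map_some, Option.getD_some]
      congr 1
      omega
    rw [h1, pvSetB, if_neg (by omega)]

-- the final plan checks of the two ports agree on a common visited list, all indices in range
theorem pv_check_eq (v : List Bool) (plan : List Int)
    (hp : ∀ p ∈ plan, -(v.length : Int) ≤ p - 1 ∧ p - 1 < v.length) :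
    (if plan.all (fun p => (PySem.List.pyGet? v (p - 1)).getD true) then "YES" else "NO")
      = pvCheckPlan v plan := by
  unfold pvCheckPlan
  have h : plan.all (fun p => (PySem.List.pyGet? v (p - 1)).getD true)
      = plan.all (fun p => pvGetB v (p - 1)) := by
    induction plan with
    | nil => rfl
    | cons q t ih =>
      obtain ⟨a, b⟩ := hp q List.mem_cons_self
      simp only [List.all_cons, pv_read_eq_getB v (q - 1) a b,
        ih (fun p hp' => hp p (List.mem_cons_of_mem _ hp'))]
  rw [h]

-- characterization of the BFS inner for-loop over a neighbour list (all entries nonnegative)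
theorem pv_bfold (L : List Int) (hL0 : ∀ x ∈ L, 0 ≤ x) (v : List Bool) (acc : List Int) :
    (((L.foldl (fun (s : List Bool × List Int) i =>
        if pvGetB s.1 i then s else (pvSetB s.1 i, s.2 ++ [i])) (v, acc))).1.length = v.length) ∧
    (∀ k, v.getD k false = true →
      ((L.foldl (fun (s : List Bool × List Int) i =>
        if pvGetB s.1 i then s else (pvSetB s.1 i, s.2 ++ [i])) (v, acc))).1.getD k false = true) ∧
    (∀ k, ((L.foldl (fun (s : List Bool × List Int) i =>
        if pvGetB s.1 i then s else (pvSetB s.1 i, s.2 ++ [i])) (v, acc))).1.getD k false = true →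
      v.getD k false = true ∨ (↑k : Int) ∈ L) ∧
    (∀ x ∈ L, 0 ≤ x → x.toNat < v.length →
      ((L.foldl (fun (s : List Bool × List Int) i =>
        if pvGetB s.1 i then s else (pvSetB s.1 i, s.2 ++ [i])) (v, acc))).1.getD x.toNat false = true) ∧
    (∀ x ∈ ((L.foldl (fun (s : List Bool × List Int) i =>
        if pvGetB s.1 i then s else (pvSetB s.1 i, s.2 ++ [i])) (v, acc))).2, x ∈ acc ∨ x ∈ L) ∧
    (∀ x ∈ acc, x ∈ ((L.foldl (fun (s : List Bool × List Int) i =>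
        if pvGetB s.1 i then s else (pvSetB s.1 i, s.2 ++ [i])) (v, acc))).2) ∧
    (((L.foldl (fun (s : List Bool × List Int) i =>
        if pvGetB s.1 i then s else (pvSetB s.1 i, s.2 ++ [i])) (v, acc))).2.length +
      ((L.foldl (fun (s : List Bool × List Int) i =>
        if pvGetB s.1 i then s else (pvSetB s.1 i, s.2 ++ [i])) (v, acc))).1.count false
      ≤ acc.length + v.count false) ∧
    (∀ k, ((L.foldl (fun (s : List Bool × List Int) i =>
        if pvGetB s.1 i then s else (pvSetB s.1 i, s.2 ++ [i])) (v, acc))).1.getD k false = true →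
      v.getD k false = false →
      (↑k : Int) ∈ ((L.foldl (fun (s : List Bool × List Int) i =>
        if pvGetB s.1 i then s else (pvSetB s.1 i, s.2 ++ [i])) (v, acc))).2) := by
  induction L generalizing v acc with
  | nil =>
    exact ⟨rfl, fun k h => h, fun k h => Or.inl h, fun x hx => absurd hx (by simp),
      fun x h => Or.inl h, fun x h => h, Nat.le_refl _,
      fun k h hf => absurd hf (by intro hf; rw [List.foldl_nil] at h; rw [hf] at h; cases h)⟩
  | cons x L' ih =>
    have hx0 : 0 ≤ x := hL0 x List.mem_cons_self
    have hL0' : ∀ y ∈ L', 0 ≤ y := fun y hy => hL0 y (List.mem_cons_of_mem _ hy)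
    simp only [List.foldl_cons]
    by_cases hx : pvGetB v x = true
    · rw [if_pos hx]
      obtain ⟨h1, h2, h3, h4, h5, h6, h7, h8⟩ := ih hL0' v acc
      refine ⟨h1, h2, ?_, ?_, ?_, h6, h7, h8⟩
      · intro k hk; rcases h3 k hk with h | h
        · exact Or.inl h
        · exact Or.inr (List.mem_cons_of_mem _ h)
      · intro y hy hy0 hyl
        rcases List.mem_cons.mp hy with rfl | hy'
        · apply h2
          have : pvGetB v y = v.getD y.toNat false := by
            have := pvGetB_eq v y.toNat hyl
            rwa [Int.toNat_of_nonneg hy0] at this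
          rw [← this, hx]
        · exact h4 y hy' hy0 hyl
      · intro y hy; rcases h5 y hy with h | h
        · exact Or.inl h
        · exact Or.inr (List.mem_cons_of_mem _ h)
    · rw [if_neg hx]
      replace hx : pvGetB v x = false := by revert hx; cases pvGetB v x <;> simp
      obtain ⟨hxl, hxf⟩ := pv_getB_false_nonneg v x hx0 hx
      have hset : pvSetB v x = v.set x.toNat true := by
        have := pvSetB_natCast v x.toNat
        rwa [Int.toNat_of_nonneg hx0] at this
      rw [hset]
      obtain ⟨h1, h2, h3, h4, h5, h6, h7, h8⟩ := ih hL0' (v.set x.toNat true) (acc ++ [x])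
      have hlen : (v.set x.toNat true).length = v.length := by simp
      refine ⟨by rw [h1, hlen], ?_, ?_, ?_, ?_, ?_, ?_, ?_⟩
      · intro k hk; exact h2 k (pv_at_mono_set v x.toNat k hk)
      · intro k hk
        rcases h3 k hk with h | h
        · by_cases he : x.toNat = k
          · subst he; exact Or.inr (by simp [Int.toNat_of_nonneg hx0])
          · rw [pv_at_set_ne v _ _ he] at h; exact Or.inl h
        · exact Or.inr (List.mem_cons_of_mem _ h)
      · intro y hy hy0 hyl
        rcases List.mem_cons.mp hy with rfl | hy'
        · apply h2; rw [pv_at_set_self v _ (by omega)]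
        · exact h4 y hy' hy0 (by rw [hlen]; exact hyl)
      · intro y hy; rcases h5 y hy with h | h
        · rcases List.mem_append.mp h with h' | h'
          · exact Or.inl h'
          · simp at h'; subst h'; exact Or.inr (List.mem_cons_self)
        · exact Or.inr (List.mem_cons_of_mem _ h)
      · intro y hy; exact h6 y (List.mem_append.mpr (Or.inl hy))
      · have := pv_count_set v x.toNat hxl hxf
        have hal : (acc ++ [x]).length = acc.length + 1 := by simp
        omega
      · intro k hk hkf
        by_cases he : x.toNat = k
        · subst he
          have : (↑x.toNat : Int) ∈ acc ++ [x] := by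
            simp [Int.toNat_of_nonneg hx0]
          exact h6 _ this
        · rw [← pv_at_set_ne v x.toNat k he] at hkf
          exact h8 k hk hkf

-- the dict A builds: reading key i inside the inner loop appends exactly the row of i
theorem pv_inner_row (array : List (List Int)) (n : Int) (i : Int) (d : PySem.Dict Int (List Int)) (c : Int) :
    ((PySem.List.pyRange 0 n).foldl (fun d j =>
        if PySem.List.pyGetD (PySem.List.pyGetD array i []) j 0 == 1 then d.modify i [] (· ++ [j])
        else d) d).getD c []
    = d.getD c [] ++ (if i = c then (PySem.List.pyRange 0 n).filter
        (fun j => PySem.List.pyGetD (PySem.List.pyGetD array i []) j 0 == 1) else []) := by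
  simp only [PySem.List.foldl_if_eq_foldl_filter
    (p := fun j => PySem.List.pyGetD (PySem.List.pyGetD array i []) j 0 == 1)
    (f := fun (d : PySem.Dict Int (List Int)) j => d.modify i [] (· ++ [j]))]
  rw [show (List.foldl (fun d j => PySem.Dict.modify d i [] (· ++ [j])) d
        ((PySem.List.pyRange 0 n).filter (fun j => PySem.List.pyGetD (PySem.List.pyGetD array i []) j 0 == 1)))
      = (List.foldl (fun d q => PySem.Dict.modify d q.1 [] (· ++ [q.2])) d
        (((PySem.List.pyRange 0 n).filter (fun j => PySem.List.pyGetD (PySem.List.pyGetD array i []) j 0 == 1)).map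
          (fun j => ((i : Int), j)))) from by rw [List.foldl_map]]
  rw [PySem.Dict.getD_foldl_modify_append]
  congr 1
  by_cases h : i = c
  · subst h; simp [List.filter_map, Function.comp]
  · simp [List.filter_map, Function.comp, h]

theorem pv_outer_rows (array : List (List Int)) (n : Int) (l : List Int) (hnd : l.Nodup) :
    ∀ (d : PySem.Dict Int (List Int)) (c : Int),
    (l.foldl (fun d i =>
      (PySem.List.pyRange 0 n).foldl (fun d j =>
        if PySem.List.pyGetD (PySem.List.pyGetD array i []) j 0 == 1 then d.modify i [] (· ++ [j])
        else d) d) d).getD c []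
    = d.getD c [] ++ (if c ∈ l then (PySem.List.pyRange 0 n).filter
        (fun j => PySem.List.pyGetD (PySem.List.pyGetD array c []) j 0 == 1) else []) := by
  induction l with
  | nil => intro d c; simp
  | cons i t ih =>
    intro d c
    rw [List.foldl_cons, ih (List.Nodup.of_cons hnd), pv_inner_row]
    by_cases h : c = i
    · subst h
      have : c ∉ t := (List.nodup_cons.mp hnd).1
      simp [this]
    · simp [h, Ne.symm h, List.mem_cons]

theorem pv_range_facts (n : Int) (hn : (n.toNat : Int) = n) :
    (PySem.List.pyRange 0 n).Nodup ∧ (PySem.List.pyRange 0 n).length = n.toNat := by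
  have hrange : PySem.List.pyRange 0 n = (List.range n.toNat).map (fun k : Nat => (k : Int)) := by
    conv_lhs => rw [← hn]
    exact PySem.List.pyRange_zero_natCast n.toNat
  constructor
  · rw [hrange]
    exact List.Nodup.map (fun a b hab => by exact_mod_cast hab) List.nodup_range
  · rw [hrange]; simp

-- membership in a filtered row is exactly the edge relation
theorem pv_row_mem (array : List (List Int)) (n : Int) (hn : (n.toNat : Int) = n)
    (x : Int) (hx0 : 0 ≤ x) (hxN : x.toNat < n.toNat) (y : Int) :
    (y ∈ (PySem.List.pyRange 0 n).filter
      (fun j => PySem.List.pyGetD (PySem.List.pyGetD array x []) j 0 == 1))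
    ↔ (0 ≤ y ∧ pvE array n.toNat x.toNat y.toNat) := by
  rw [List.mem_filter, PySem.List.mem_pyRange_one]
  constructor
  · rintro ⟨⟨hy0, hyn⟩, hval⟩
    refine ⟨hy0, hxN, by omega, ?_⟩
    rw [show x = ((x.toNat : Nat) : Int) from by omega,
      show y = ((y.toNat : Nat) : Int) from by omega,
      PySem.List.pyGetD_natCast, PySem.List.pyGetD_natCast] at hval
    exact beq_iff_eq.mp hval
  · rintro ⟨hy0, _, hyN, hval⟩
    refine ⟨⟨hy0, by omega⟩, ?_⟩
    rw [show x = ((x.toNat : Nat) : Int) from by omega,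
      show y = ((y.toNat : Nat) : Int) from by omega,
      PySem.List.pyGetD_natCast, PySem.List.pyGetD_natCast]
    exact beq_iff_eq.mpr hval

-- B's neighbour list of a valid vertex is exactly its out-edge set
theorem pv_nbrs_mem (array : List (List Int)) (n : Int) (hn : (n.toNat : Int) = n)
    (x : Int) (hx0 : 0 ≤ x) (hxN : x.toNat < n.toNat) (y : Int) :
    y ∈ pvNbrs array n x ↔ (0 ≤ y ∧ pvE array n.toNat x.toNat y.toNat) := by
  unfold pvNbrs
  rw [if_pos ⟨hx0, by omega⟩]
  exact pv_row_mem array n hn x hx0 hxN y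

theorem pv_nbrs_len (array : List (List Int)) (n : Int) (hn : (n.toNat : Int) = n) (x : Int) :
    (pvNbrs array n x).length ≤ n.toNat := by
  unfold pvNbrs
  split_ifs with h
  · have h1 := List.length_filter_le
      (fun j => PySem.List.pyGetD (PySem.List.pyGetD array x []) j 0 == 1)
      (PySem.List.pyRange 0 n)
    have h2 := (pv_range_facts n hn).2
    omega
  · simp

theorem pv_bfs_main (routes : PySem.Dict Int (List Int)) (array : List (List Int)) (N : Nat) (s : Nat)
    (Hrow : ∀ x : Int, 0 ≤ x → x.toNat < N →
      ∀ y : Int, y ∈ routes.getD x [] ↔ (0 ≤ y ∧ pvE array N x.toNat y.toNat)) :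
    ∀ (fuel : Nat) (v : List Bool) (q : List Int), v.length = N →
    fuel ≥ q.length + v.count false + 1 →
    (∀ x ∈ q, 0 ≤ x ∧ x.toNat < N ∧ v.getD x.toNat false = true) →
    (∀ k, v.getD k false = true → pvReach array N s k) →
    (∀ k, v.getD k false = true → (↑k : Int) ∈ q ∨ ∀ j, pvE array N k j → v.getD j false = true) →
    ((pvBfs routes fuel v q).length = N ∧
     (∀ k, v.getD k false = true → (pvBfs routes fuel v q).getD k false = true) ∧
     (∀ k, (pvBfs routes fuel v q).getD k false = true → pvReach array N s k) ∧
     (∀ k j, (pvBfs routes fuel v q).getD k false = true → pvE array N k j →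
        (pvBfs routes fuel v q).getD j false = true)) := by
  intro fuel
  induction fuel with
  | zero => intro v q _ hfuel _ _ _; omega
  | succ f ih =>
    intro v q hlen hfuel hq hsound hdef
    cases q with
    | nil =>
      refine ⟨hlen, fun k h => h, hsound, ?_⟩
      intro k j hk he
      rcases hdef k hk with h | h
      · cases h
      · exact h j he
    | cons now rest =>
      obtain ⟨hnow0, hnowN, hnowT⟩ := hq now (List.mem_cons_self)
      have hL : ∀ y ∈ routes.getD now [], 0 ≤ y ∧ pvE array N now.toNat y.toNat :=
        fun y hy => (Hrow now hnow0 hnowN y).mp hy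
      set F := (routes.getD now []).foldl (fun (s : List Bool × List Int) i =>
        if pvGetB s.1 i then s else (pvSetB s.1 i, s.2 ++ [i])) (v, rest) with hF
      have hstep : pvBfs routes (f + 1) v (now :: rest) = pvBfs routes f F.1 F.2 := by
        rw [hF]; rfl
      obtain ⟨h1, h2, h3, h4, h5, h6, h7, h8⟩ :=
        pv_bfold (routes.getD now []) (fun y hy => (hL y hy).1) v rest
      rw [← hF] at h1 h2 h3 h4 h5 h6 h7 h8
      have hreachnow : pvReach array N s now.toNat := hsound now.toNat hnowT
      obtain ⟨g1, g2, g3, g4⟩ := ih F.1 F.2 (by rw [h1, hlen])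
        (by have : (now :: rest).length = rest.length + 1 := rfl; omega)
        (by
          intro x hx
          rcases h5 x hx with hr | hl
          · obtain ⟨a, b, c⟩ := hq x (List.mem_cons_of_mem _ hr)
            exact ⟨a, b, h2 _ c⟩
          · obtain ⟨hy0, hE⟩ := hL x hl
            exact ⟨hy0, hE.2.1, h4 x hl hy0 (by rw [hlen]; exact hE.2.1)⟩)
        (by
          intro k hk
          rcases h3 k hk with h | h
          · exact hsound k h
          · obtain ⟨_, hE⟩ := hL _ h
            rw [Int.toNat_natCast] at hE
            exact Relation.ReflTransGen.tail hreachnow hE)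
        (by
          intro k hk
          by_cases hvk : v.getD k false = true
          · rcases hdef k hvk with hmem | hcl
            · rcases List.mem_cons.mp hmem with heq | hmem'
              · -- k is the popped vertex: all its neighbours are now marked
                have hkN : k = now.toNat := by omega
                subst hkN
                refine Or.inr ?_
                intro j hE
                have hjm : (↑j : Int) ∈ routes.getD now [] := by
                  refine (Hrow now hnow0 hnowN ↑j).mpr ⟨by omega, ?_⟩
                  rwa [Int.toNat_natCast]
                have := h4 _ hjm (by omega) (by rw [hlen, Int.toNat_natCast]; exact hE.2.1)
                rwa [Int.toNat_natCast] at this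
              · exact Or.inl (h6 _ hmem')
            · exact Or.inr (fun j hE => h2 _ (hcl j hE))
          · have hvf : v.getD k false = false := by revert hvk; cases v.getD k false <;> simp
            exact Or.inl (h8 k hk hvf))
      rw [hstep]
      exact ⟨g1, fun k h => g2 k (h2 k h), g3, g4⟩

theorem pv_walk_main (array : List (List Int)) (n : Int) (N : Nat) (s : Nat)
    (hNn : (N : Int) = n) :
    ∀ (fuel : Nat) (v : List Bool) (st : List Int), v.length = N →
    fuel ≥ st.length + (N + 1) * v.count false + 1 →
    (∀ x ∈ st, 0 ≤ x ∧ x.toNat < N ∧ pvReach array N s x.toNat) →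
    (∀ k, v.getD k false = true → pvReach array N s k) →
    ((pvWalk array n fuel v st).length = N ∧
     (∀ k, v.getD k false = true → (pvWalk array n fuel v st).getD k false = true) ∧
     (∀ x ∈ st, (pvWalk array n fuel v st).getD x.toNat false = true) ∧
     (∀ k, (pvWalk array n fuel v st).getD k false = true → pvReach array N s k) ∧
     (∀ k j, (pvWalk array n fuel v st).getD k false = true → v.getD k false = false →
        pvE array N k j → (pvWalk array n fuel v st).getD j false = true)) := by
  have hn : (n.toNat : Int) = n := by omega
  have hNtoNat : n.toNat = N := by omega
  intro fuel
  induction fuel with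
  | zero => intro v st _ hfuel _ _; omega
  | succ f ih =>
    intro v st hlen hfuel hst hsound
    cases st with
    | nil =>
      refine ⟨hlen, fun k h => h, fun x hx => absurd hx (by simp), hsound, ?_⟩
      intro k j hk hkf _
      rw [show pvWalk array n (f + 1) v [] = v from rfl] at hk
      rw [hk] at hkf; cases hkf
    | cons u st =>
      obtain ⟨hu0, huN, hureach⟩ := hst u (List.mem_cons_self)
      have hul : u.toNat < v.length := by omega
      have hread : (PySem.List.pyGet? v u).getD true = v.getD u.toNat false :=
        pv_read_nonneg v u hu0 hul
      by_cases hvu : v.getD u.toNat false = true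
      · have hstep : pvWalk array n (f + 1) v (u :: st) = pvWalk array n f v st := by
          simp only [pvWalk, hread, hvu, if_true]
        obtain ⟨g1, g2, g3, g4, g5⟩ := ih v st hlen
          (by have : (u :: st).length = st.length + 1 := rfl; omega)
          (fun x hx => hst x (List.mem_cons_of_mem _ hx)) hsound
        rw [hstep]
        refine ⟨g1, g2, ?_, g4, g5⟩
        intro x hx
        rcases List.mem_cons.mp hx with heq | hx'
        · rw [heq]; exact g2 _ hvu
        · exact g3 x hx'
      · replace hvu : v.getD u.toNat false = false := by
          revert hvu; cases v.getD u.toNat false <;> simp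
        have hset : PySem.List.pySetD v u true = v.set u.toNat true :=
          PySem.List.pySetD_of_nonneg v true hu0
        have hstep : pvWalk array n (f + 1) v (u :: st)
            = pvWalk array n f (v.set u.toNat true)
              ((pvNbrs array n u).foldl (fun s w => w :: s) st) := by
          simp only [pvWalk, hread, hvu, Bool.false_eq_true, if_false, hset]
        have hfold : (pvNbrs array n u).foldl (fun s w => w :: s) st
            = (pvNbrs array n u).reverse ++ st := List.foldl_flip_cons_eq_append'
        rw [hstep, hfold]
        have hrowiff : ∀ y : Int, y ∈ pvNbrs array n u ↔ (0 ≤ y ∧ pvE array N u.toNat y.toNat) := by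
          intro y
          have := pv_nbrs_mem array n hn u hu0 (by omega) y
          rwa [hNtoNat] at this
        have hureach' : ∀ y ∈ (pvNbrs array n u).reverse ++ st,
            0 ≤ y ∧ y.toNat < N ∧ pvReach array N s y.toNat := by
          intro y hy
          rcases List.mem_append.mp hy with hy' | hy'
          · obtain ⟨hy0, hE⟩ := (hrowiff y).mp (List.mem_reverse.mp hy')
            exact ⟨hy0, hE.2.1, Relation.ReflTransGen.tail hureach hE⟩
          · exact hst y (List.mem_cons_of_mem _ hy')
        have hcnt := pv_count_set v u.toNat hul hvu
        obtain ⟨g1, g2, g3, g4, g5⟩ := ih (v.set u.toNat true)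
          ((pvNbrs array n u).reverse ++ st)
          (by simpa using hlen)
          (by
            have hlb : ((pvNbrs array n u).reverse ++ st).length ≤ N + st.length := by
              rw [List.length_append, List.length_reverse]
              have := pv_nbrs_len array n hn u
              omega
            have hmul : (N + 1) * v.count false = (N + 1) * (v.set u.toNat true).count false + (N + 1) := by
              have : v.count false = (v.set u.toNat true).count false + 1 := by omega
              rw [this]; ring
            have : (u :: st).length = st.length + 1 := rfl
            omega)
          hureach'
          (by
            intro k hk
            by_cases he : u.toNat = k
            · subst he; exact hureach
            · rw [pv_at_set_ne v _ _ he] at hk; exact hsound k hk)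
        refine ⟨g1, ?_, ?_, g4, ?_⟩
        · intro k hk; exact g2 k (pv_at_mono_set v u.toNat k hk)
        · intro x hx
          rcases List.mem_cons.mp hx with heq | hx'
          · rw [heq]; exact g2 _ (pv_at_set_self v u.toNat hul)
          · exact g3 x (List.mem_append.mpr (Or.inr hx'))
        · intro k j hk hkf hE
          by_cases he : u.toNat = k
          · subst he
            have hjm : (↑j : Int) ∈ (pvNbrs array n u).reverse ++ st := by
              refine List.mem_append.mpr (Or.inl (List.mem_reverse.mpr ?_))
              exact (hrowiff ↑j).mpr ⟨by omega, by rwa [Int.toNat_natCast]⟩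
            have := g3 _ hjm
            rwa [Int.toNat_natCast] at this
          · rw [← pv_at_set_ne v u.toNat k he] at hkf
            exact g5 k j hk hkf hE

-- one-step evaluation lemmas for a start vertex with no adjacency entry / a negative vertex
theorem pvBfs_one_empty (routes : PySem.Dict Int (List Int)) (f : Nat) (v : List Bool) (x : Int)
    (h : routes.getD x [] = []) : pvBfs routes (f + 1) v [x] = v := by
  simp only [pvBfs, h, List.foldl_nil]

theorem pvWalk_one_neg (array : List (List Int)) (n : Int) (f : Nat) (v : List Bool) (x : Int)
    (hx : x < 0) (hread : (PySem.List.pyGet? v x).getD true = false) :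
    pvWalk array n (f + 1) v [x] = PySem.List.pySetD v x true := by
  have hnb : pvNbrs array n x = [] := by unfold pvNbrs; rw [if_neg (by omega)]
  simp only [pvWalk, hread, Bool.false_eq_true, if_false, hnb, List.foldl_nil]

theorem solution_spec' (array : List (List Int)) (n : Int) (m : Int) (plan : List Int)
    (hpre : Pre_solution array n m plan) : solution array n m plan = solution_alt array n m plan := by
  obtain ⟨hn1, halen, hrows, hpne, hplan⟩ := hpre
  cases plan with
  | nil => exact absurd rfl hpne
  | cons p t =>
    obtain ⟨hp1, hpn⟩ := hplan p List.mem_cons_self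
    have hnN : ((n.toNat : Nat) : Int) = n := by omega
    obtain ⟨hnd, hrangelen⟩ := pv_range_facts n hnN
    have hstart : PySem.List.pyGetD (p :: t) 0 1 = p := by simp
    have hA : solution array n m (p :: t)
        = pvCheckPlan (pvBfs
            ((PySem.List.pyRange 0 n).foldl (fun d i =>
              (PySem.List.pyRange 0 n).foldl (fun d j =>
                if PySem.List.pyGetD (PySem.List.pyGetD array i []) j 0 == 1 then d.modify i [] (· ++ [j])
                else d) d)
              PySem.Dict.empty)
            (n.toNat + 2)
            (pvSetB (List.replicate n.toNat false) (PySem.List.pyGetD (p :: t) 0 1 - 1))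
            [PySem.List.pyGetD (p :: t) 0 1 - 1]) (p :: t) := rfl
    have hB : solution_alt array n m (p :: t)
        = (if (p :: t).all (fun q => (PySem.List.pyGet?
              (pvWalk array n (n.toNat * n.toNat + n.toNat + 2)
                (List.replicate n.toNat false) [PySem.List.pyGetD (p :: t) 0 1 - 1]) (q - 1)).getD true)
           then "YES" else "NO") := rfl
    rw [hstart] at hA hB
    rw [hA, hB]
    set R := ((PySem.List.pyRange 0 n).foldl (fun d i =>
              (PySem.List.pyRange 0 n).foldl (fun d j =>
                if PySem.List.pyGetD (PySem.List.pyGetD array i []) j 0 == 1 then d.modify i [] (· ++ [j])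
                else d) d)
              PySem.Dict.empty) with hR
    have hRrow : ∀ c : Int, R.getD c [] = (if c ∈ PySem.List.pyRange 0 n then
        (PySem.List.pyRange 0 n).filter
          (fun j => PySem.List.pyGetD (PySem.List.pyGetD array c []) j 0 == 1) else []) := by
      intro c
      rw [hR, pv_outer_rows array n _ hnd PySem.Dict.empty c]
      simp
    have hv0len : (List.replicate n.toNat false).length = n.toNat := by simp
    have hv0cnt : (List.replicate n.toNat false).count false = n.toNat := by simp
    by_cases hs0 : 0 ≤ p - 1
    · -- normal start vertex: both sides mark exactly the vertices reachable from it
      have hSN : (p - 1).toNat < n.toNat := by omega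
      have Hrow : ∀ x : Int, 0 ≤ x → x.toNat < n.toNat →
          ∀ y : Int, y ∈ R.getD x [] ↔ (0 ≤ y ∧ pvE array n.toNat x.toNat y.toNat) := by
        intro x hx0 hxN y
        rw [hRrow x, if_pos (by rw [PySem.List.mem_pyRange_one]; omega)]
        exact pv_row_mem array n hnN x hx0 hxN y
      have hset0 : pvSetB (List.replicate n.toNat false) (p - 1)
          = (List.replicate n.toNat false).set (p - 1).toNat true := by
        conv_lhs => rw [show (p - 1 : Int) = (((p - 1).toNat : Nat) : Int) from by omega]
        exact pvSetB_natCast _ _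
      rw [hset0]
      have hcntA : ((List.replicate n.toNat false).set (p - 1).toNat true).count false + 1 = n.toNat := by
        rw [pv_count_set _ _ (by rw [hv0len]; exact hSN) (pv_at_replicate _ _), hv0cnt]
      have hmarked0 : ((List.replicate n.toNat false).set (p - 1).toNat true).getD (p - 1).toNat false = true :=
        pv_at_set_self _ _ (by rw [hv0len]; exact hSN)
      obtain ⟨a1, a2, a3, a4⟩ := pv_bfs_main R array n.toNat (p - 1).toNat Hrow
        (n.toNat + 2) ((List.replicate n.toNat false).set (p - 1).toNat true) [p - 1]
        (by simp)
        (by simp only [List.length_singleton]; omega)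
        (by
          intro x hx
          rw [List.mem_singleton] at hx
          subst hx
          exact ⟨by omega, hSN, hmarked0⟩)
        (by
          intro k hk
          by_cases he : (p - 1).toNat = k
          · subst he; exact Relation.ReflTransGen.refl
          · rw [pv_at_set_ne _ _ _ he, pv_at_replicate] at hk; cases hk)
        (by
          intro k hk
          by_cases he : (p - 1).toNat = k
          · subst he; exact Or.inl (by rw [List.mem_singleton]; omega)
          · rw [pv_at_set_ne _ _ _ he, pv_at_replicate] at hk; cases hk)
      have hRAiff : ∀ k, (pvBfs R (n.toNat + 2)
          ((List.replicate n.toNat false).set (p - 1).toNat true) [p - 1]).getD k false = true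
          ↔ pvReach array n.toNat (p - 1).toNat k := by
        intro k
        refine ⟨a3 k, fun hr => ?_⟩
        exact pv_reach_subset array n.toNat (p - 1).toNat _ (a2 _ hmarked0) a4 k hr
      obtain ⟨b1, b2, b3, b4, b5⟩ := pv_walk_main array n n.toNat (p - 1).toNat hnN
        (n.toNat * n.toNat + n.toNat + 2) (List.replicate n.toNat false) [p - 1]
        hv0len
        (by
          have : (n.toNat + 1) * n.toNat = n.toNat * n.toNat + n.toNat := by ring
          simp only [List.length_singleton, hv0cnt]; omega)
        (by
          intro x hx
          rw [List.mem_singleton] at hx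
          subst hx
          exact ⟨by omega, hSN, Relation.ReflTransGen.refl⟩)
        (by intro k hk; rw [pv_at_replicate] at hk; cases hk)
      have hRBiff : ∀ k, (pvWalk array n (n.toNat * n.toNat + n.toNat + 2)
          (List.replicate n.toNat false) [p - 1]).getD k false = true
          ↔ pvReach array n.toNat (p - 1).toNat k := by
        intro k
        refine ⟨b4 k, fun hr => ?_⟩
        refine pv_reach_subset array n.toNat (p - 1).toNat _ ?_
          (fun u j hu he => b5 u j hu (pv_at_replicate _ _) he) k hr
        exact b3 (p - 1) (List.mem_singleton_self _)
      have hVEQ : pvBfs R (n.toNat + 2) ((List.replicate n.toNat false).set (p - 1).toNat true) [p - 1]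
          = pvWalk array n (n.toNat * n.toNat + n.toNat + 2) (List.replicate n.toNat false) [p - 1] := by
        apply List.ext_getElem (by rw [a1, b1])
        intro i h1 h2
        have hA' := hRAiff i
        have hB' := hRBiff i
        rw [List.getD_eq_getElem _ _ h1] at hA'
        rw [List.getD_eq_getElem _ _ h2] at hB'
        by_cases hr : pvReach array n.toNat (p - 1).toNat i
        · rw [hA'.mpr hr, hB'.mpr hr]
        · cases ha : (pvBfs R (n.toNat + 2)
              ((List.replicate n.toNat false).set (p - 1).toNat true) [p - 1])[i] <;>
            cases hb : (pvWalk array n (n.toNat * n.toNat + n.toNat + 2)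
              (List.replicate n.toNat false) [p - 1])[i]
          · rfl
          · exact absurd (hB'.mp hb) hr
          · exact absurd (hA'.mp ha) hr
          · rfl
      rw [← hVEQ]
      refine (pv_check_eq _ (p :: t) ?_).symm
      intro q hq
      obtain ⟨hq1, hq2⟩ := hplan q hq
      rw [a1]
      constructor <;> omega
    · -- wrapped (negative) start index: A finds no adjacency entry for it and B's neighbors(u)
      -- is [] there, so both mark exactly the wrapped start cell and nothing else
      have hnotmem : (p - 1 : Int) ∉ PySem.List.pyRange 0 n := by
        rw [PySem.List.mem_pyRange_one]; omega
      have hRneg : R.getD (p - 1) [] = [] := by rw [hRrow (p - 1), if_neg hnotmem]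
      have hread : (PySem.List.pyGet? (List.replicate n.toNat false) (p - 1)).getD true = false := by
        rw [pv_read_eq_getB _ _ (by rw [hv0len]; omega) (by rw [hv0len]; omega)]
        simp only [pvGetB, if_neg (by omega : ¬ (0 : Int) ≤ p - 1), hv0len]
        rw [List.getD_eq_getElem _ _ (by simp; omega)]
        simp
      rw [show n.toNat + 2 = (n.toNat + 1) + 1 from rfl,
        pvBfs_one_empty R (n.toNat + 1) _ (p - 1) hRneg]
      rw [show n.toNat * n.toNat + n.toNat + 2 = (n.toNat * n.toNat + n.toNat + 1) + 1 from rfl,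
        pvWalk_one_neg array n (n.toNat * n.toNat + n.toNat + 1) _ (p - 1) (by omega) hread]
      rw [pv_write_eq_setB _ _ (by rw [hv0len]; omega) (by rw [hv0len]; omega)]
      refine (pv_check_eq _ (p :: t) ?_).symm
      intro q hq
      obtain ⟨hq1, hq2⟩ := hplan q hq
      have : (pvSetB (List.replicate n.toNat false) (p - 1)).length = n.toNat := by
        simp [pvSetB]; split_ifs <;> simp
      constructor <;> omega

-- ===== VERDICT (by name: the statement is the Claim_ definition above) =====
theorem solution_spec : Claim_equal_solution := by
  intro array n m plan _ hpre
  unfold Spec_solution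
  exact solution_spec' array n m plan hpre
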